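-- pv_equiv track=rewrite | github.com/Yomguithereal/fog | fog/metrics/utils.py | intersection_size
-- ===== SOURCE A (Python) =====
-- ACCEPTABLE_TYPES = (set, frozenset, dict)
--
-- def intersection_size(A, B):
--     if A is B:
--         return len(A)
--
--     if not isinstance(A, ACCEPTABLE_TYPES):
--         A = set(A)
--
--     if not isinstance(B, ACCEPTABLE_TYPES):
--         B = set(B)
--
--     if len(A) > len(B):
--         A, B = B, A
--
--     if len(A) == 0:
--         return 0
--
--     i = 0
--
--     for x in A:
--         if x in B:
--             i += 1
--
--     return i
-- ===== SOURCE B (Python) =====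
-- ACCEPTABLE_TYPES = (set, frozenset, dict)
--
-- def intersection_size(A, B):
--     if A is B:
--         return len(A)
--
--     if not isinstance(A, ACCEPTABLE_TYPES):
--         A = set(A)
--
--     if not isinstance(B, ACCEPTABLE_TYPES):
--         B = set(B)
--
--     counts = {}
--     for x in A:
--         counts[x] = counts.get(x, 0) + 1
--     for x in B:
--         counts[x] = counts.get(x, 0) + 1
--
--     return sum(1 for c in counts.values() if c == 2)
-- ===== Notes on version B (the rewrite author's own statement) =====
-- stated objective: alternative
-- what changed: Instead of membership-probing the larger set while iterating the smaller (with a size swap), B builds one frequency table over the elements of both sets and counts the keys whose tally is 2, which are exactly the common elements.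
import Mathlib
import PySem

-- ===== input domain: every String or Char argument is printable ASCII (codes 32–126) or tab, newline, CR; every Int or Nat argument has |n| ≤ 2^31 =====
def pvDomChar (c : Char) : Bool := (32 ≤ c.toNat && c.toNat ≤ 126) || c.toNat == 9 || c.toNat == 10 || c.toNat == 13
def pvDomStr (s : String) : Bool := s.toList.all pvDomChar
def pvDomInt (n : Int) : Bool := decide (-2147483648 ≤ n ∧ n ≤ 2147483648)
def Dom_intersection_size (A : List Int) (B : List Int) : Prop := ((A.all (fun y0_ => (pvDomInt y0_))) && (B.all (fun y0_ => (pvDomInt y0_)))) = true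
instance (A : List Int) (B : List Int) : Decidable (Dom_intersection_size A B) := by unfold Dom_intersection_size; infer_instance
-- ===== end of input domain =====

-- B counts common elements with one frequency table over both sets instead of A's
-- membership probing of the larger set; same cost, different traversal (objective: alternative).
-- The Python 'A is B' branch is object identity of two distinct arguments and is never taken
-- for the two separate list arguments modelled here, so it has no counterpart in the ports.

-- ===== PORT A =====
def intersection_size (A : List Int) (B : List Int) : Int :=
  let a : PySem.Set Int := PySem.Set.ofList A      -- A = set(A)
  let b : PySem.Set Int := PySem.Set.ofList B      -- B = set(B)
  let p := if a.length > b.length then (b, a) else (a, b)   -- if len(A) > len(B): A, B = B, A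
  if p.1.length = 0 then 0
  else p.1.foldl (fun i x => if PySem.Set.contains p.2 x then i + 1 else i) (0 : Int)

-- ===== PORT B =====
def intersection_size_alt (A : List Int) (B : List Int) : Int :=
  let a : PySem.Set Int := PySem.Set.ofList A      -- A = set(A)
  let b : PySem.Set Int := PySem.Set.ofList B      -- B = set(B)
  -- counts[x] = counts.get(x, 0) + 1 over A, then over B
  let counts :=
    b.foldl (fun d x => d.insert x (d.getD x 0 + 1))
      (a.foldl (fun d x => d.insert x (d.getD x 0 + 1)) (PySem.Dict.empty : PySem.Dict Int Int))
  -- sum(1 for c in counts.values() if c == 2)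
  (((PySem.Dict.values counts).filter (fun c => c == (2 : Int))).length : Int)

-- ===== PRECONDITION & SPEC =====
def Spec_intersection_size (A : List Int) (B : List Int) (out : Int) : Prop := out = intersection_size_alt A B
instance (A : List Int) (B : List Int) (out : Int) : Decidable (Spec_intersection_size A B out) := by unfold Spec_intersection_size; infer_instance

-- ===== CLAIM (what is proved, stated in full; the proofs are below) =====
def Claim_equal_intersection_size : Prop := ∀ (A : List Int) (B : List Int), Dom_intersection_size A B → Spec_intersection_size A B (intersection_size A B)

-- ===== LEMMAS AND PROOFS =====

-- Two duplicate-free lists with the same members have the same length.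
theorem pv_len_eq {u v : List Int} (hu : u.Nodup) (hv : v.Nodup)
    (h : ∀ x, x ∈ u ↔ x ∈ v) : u.length = v.length :=
  ((List.perm_ext_iff_of_nodup hu hv).2 h).length_eq

theorem pv_count_mem {l : List Int} (hl : l.Nodup) (x : Int) :
    l.count x = if x ∈ l then 1 else 0 := by
  split
  · exact List.count_eq_one_of_mem hl (by assumption)
  · exact List.count_eq_zero_of_not_mem (by assumption)

-- A's guarded membership-probing loop counts the probed list's elements lying in the other.
theorem pv_Aside (u v : List Int) :
    (if u.length = 0 then (0 : Int)
     else u.foldl (fun i x => if PySem.Set.contains v x then i + 1 else i) (0 : Int))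
      = ((u.filter (fun x => decide (x ∈ v))).length : Int) := by
  split
  · have : u = [] := List.length_eq_zero_iff.mp (by assumption)
    simp [this]
  · rw [PySem.List.foldl_if_add_one, List.countP_eq_length_filter]
    have : u.filter (fun x => PySem.Set.contains v x) = u.filter (fun x => decide (x ∈ v)) :=
      List.filter_congr (fun x _ => by simp)
    simp [this]

-- B's tally: keys of the frequency table over u ++ v whose count is 2 are the common members.
theorem pv_key (u v : List Int) (hu : u.Nodup) (hv : v.Nodup) :
    (u.filter (fun x => decide (x ∈ v))).length
      = ((PySem.Set.ofList (u ++ v)).filter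
          (fun k => ((u ++ v).count k : Int) == (2 : Int))).length := by
  apply pv_len_eq (hu.filter _) ((PySem.Set.nodup_ofList _).filter _)
  intro x
  simp only [List.mem_filter, PySem.Set.mem_ofList, List.mem_append, decide_eq_true_eq,
    List.count_append, pv_count_mem hu, pv_count_mem hv]
  by_cases hxu : x ∈ u <;> by_cases hxv : x ∈ v <;> simp [hxu, hxv]

-- counting in u or in v first tallies the same common members
theorem pv_key_comm (u v : List Int) (hu : u.Nodup) (hv : v.Nodup) :
    ((PySem.Set.ofList (v ++ u)).filter
        (fun k => ((v ++ u).count k : Int) == (2 : Int))).length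
      = ((PySem.Set.ofList (u ++ v)).filter
          (fun k => ((u ++ v).count k : Int) == (2 : Int))).length := by
  apply pv_len_eq ((PySem.Set.nodup_ofList _).filter _) ((PySem.Set.nodup_ofList _).filter _)
  intro x
  simp only [List.mem_filter, PySem.Set.mem_ofList, List.mem_append, List.count_append,
    pv_count_mem hu, pv_count_mem hv]
  by_cases hxu : x ∈ u <;> by_cases hxv : x ∈ v <;> simp [hxu, hxv]

theorem intersection_size_spec : Claim_equal_intersection_size := by
  intro A B _
  unfold Spec_intersection_size intersection_size intersection_size_alt
  simp only []
  set a := PySem.Set.ofList A with ha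
  set b := PySem.Set.ofList B with hb
  have hna : a.Nodup := PySem.Set.nodup_ofList A
  have hnb : b.Nodup := PySem.Set.nodup_ofList B
  -- B side: the two counting loops are one counter over a ++ b
  have hcounts :
      b.foldl (fun d x => d.insert x (d.getD x 0 + 1))
        (a.foldl (fun d x => d.insert x (d.getD x 0 + 1)) (PySem.Dict.empty : PySem.Dict Int Int))
      = PySem.Dict.counter (a ++ b) := by
    rw [← List.foldl_append, PySem.Dict.foldl_insert_getD_add_one_eq_counter]
  rw [hcounts]
  have hvals : (PySem.Dict.counter (a ++ b)).values
      = (PySem.Set.ofList (a ++ b)).map (fun k => ((a ++ b).count k : Int)) := by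
    have := PySem.Dict.items_counter (a ++ b)
    simp [PySem.Dict.values, this]
  rw [hvals, List.filter_map, List.length_map]
  simp only [Function.comp_def]
  by_cases hlen : a.length > b.length
  · rw [if_pos hlen, pv_Aside]
    rw [Int.natCast_inj.mpr (pv_key b a hnb hna), Int.natCast_inj.mpr (pv_key_comm a b hna hnb)]
  · rw [if_neg hlen, pv_Aside]
    exact_mod_cast pv_key a b hna hnb
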